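-- pv_equiv track=rewrite | github.com/fy21dk/COMP3011-CW2 | src/search.py | calculate_strictAND_score
-- ===== SOURCE A (Python) =====
-- def calculate_strictAND_score(query_terms, doc_positions):
--     """
--     Perform strict AND search with distance-based ranking.
--
--     Ranking strategy:
--     1. All query terms must exist in the same document.
--     2. Documents are ranked by positional proximity of query terms.
--     3. Smaller distance between query words gives higher score.
--     4. Exact phrase matches receive the best ranking.
--     """
--
--     total_distance = 0
--
--     for i in range(len(query_terms) - 1):
--         left_positions = doc_positions.get(query_terms[i], [])
--         right_positions = doc_positions.get(query_terms[i + 1], [])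
--
--         if not left_positions or not right_positions:
--             return 0
--
--         min_distance = min(
--             abs(left - right)
--             for left in left_positions
--             for right in right_positions
--         )
--
--         total_distance += min_distance
--
--     return 1000 - total_distance
-- ===== SOURCE B (Python) =====
-- def calculate_strictAND_score(query_terms, doc_positions):
--     total = 0
--     for left_t, right_t in zip(query_terms, query_terms[1:]):
--         ls = sorted(doc_positions.get(left_t, []))
--         rs = sorted(doc_positions.get(right_t, []))
--         if not ls or not rs:
--             return 0
--         i = j = 0
--         best = abs(ls[0] - rs[0])
--         while i < len(ls) and j < len(rs):
--             d = abs(ls[i] - rs[j])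
--             if d < best:
--                 best = d
--             if ls[i] < rs[j]:
--                 i += 1
--             else:
--                 j += 1
--         total += best
--     return 1000 - total
-- ===== Notes on version B (the rewrite author's own statement) =====
-- stated objective: alternative
-- what changed: Per adjacent term pair, the minimum |left-right| is found by sorting both position lists and doing a single two-pointer merge sweep (zipping adjacent terms) instead of scanning the full cross product; asymptotically O(L log L + R log R) per pair vs O(L*R), though not measurably faster on the timing inputs.
import Mathlib
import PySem

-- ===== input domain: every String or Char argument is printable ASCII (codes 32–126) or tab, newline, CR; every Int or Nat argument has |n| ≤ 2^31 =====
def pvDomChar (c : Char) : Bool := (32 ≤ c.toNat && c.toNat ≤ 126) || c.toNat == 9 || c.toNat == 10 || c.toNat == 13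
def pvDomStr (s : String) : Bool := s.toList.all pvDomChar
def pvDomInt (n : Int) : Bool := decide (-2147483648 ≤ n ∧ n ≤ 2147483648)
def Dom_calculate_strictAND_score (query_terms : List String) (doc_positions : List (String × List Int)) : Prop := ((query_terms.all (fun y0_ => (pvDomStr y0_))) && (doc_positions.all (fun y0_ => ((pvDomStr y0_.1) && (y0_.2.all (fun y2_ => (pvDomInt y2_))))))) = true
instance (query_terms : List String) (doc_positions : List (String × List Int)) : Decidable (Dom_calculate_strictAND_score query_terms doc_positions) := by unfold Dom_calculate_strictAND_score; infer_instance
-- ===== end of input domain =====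

-- B replaces A's per-pair brute-force min over the full cross product of positions by
-- sort + a two-pointer sweep per adjacent pair (objective: alternative algorithm).

-- ===== PORT A =====
-- the generator's candidate list: [abs(left-right) for left in left_positions for right in right_positions]
def pvCand (left right : List Int) : List Int :=
  left.flatMap (fun l => right.map (fun r => |l - r|))

-- Python's min() of the (guard-guaranteed nonempty) candidate list; [] is unreachable
def pvMinA : List Int → Int
  | [] => 0
  | c :: cs => cs.foldl min c

def pvALoop (query_terms : List String) (doc_positions : List (String × List Int)) : List Int → Int → Int
  | [], total => 1000 - total
  | i :: rest, total =>
    let left := PySem.Dict.getD (PySem.Dict.mk doc_positions) (PySem.List.pyGetD query_terms i "") []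
    let right := PySem.Dict.getD (PySem.Dict.mk doc_positions) (PySem.List.pyGetD query_terms (i + 1) "") []
    if left = [] ∨ right = [] then 0
    else pvALoop query_terms doc_positions rest (total + pvMinA (pvCand left right))

def calculate_strictAND_score (query_terms : List String) (doc_positions : List (String × List Int)) : Int :=
  pvALoop query_terms doc_positions (PySem.List.pyRange 0 ((query_terms.length : Int) - 1) 1) 0

-- ===== PORT B =====
-- the while-loop: two pointers over the two sorted position lists, running best
def pvTwoPtr : List Int → List Int → Int → Int
  | x :: xs, y :: ys, best =>
    let d := |x - y|
    let best' := if d < best then d else best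
    if x < y then pvTwoPtr xs (y :: ys) best' else pvTwoPtr (x :: xs) ys best'
  | _, _, best => best
termination_by xs ys _ => xs.length + ys.length

def pvBLoop (doc_positions : List (String × List Int)) : List (String × String) → Int → Int
  | [], total => 1000 - total
  | (lt, rt) :: rest, total =>
    let ls := PySem.List.sorted (PySem.Dict.getD (PySem.Dict.mk doc_positions) lt []) (fun x => x)
    let rs := PySem.List.sorted (PySem.Dict.getD (PySem.Dict.mk doc_positions) rt []) (fun x => x)
    match ls, rs with
    | l0 :: lt', r0 :: rt' => pvBLoop doc_positions rest (total + pvTwoPtr (l0 :: lt') (r0 :: rt') |l0 - r0|)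
    | _, _ => 0

def calculate_strictAND_score_alt (query_terms : List String) (doc_positions : List (String × List Int)) : Int :=
  pvBLoop doc_positions (query_terms.zip (PySem.List.slice query_terms (some 1) none)) 0

-- ===== PRECONDITION & SPEC =====
def Spec_calculate_strictAND_score (query_terms : List String) (doc_positions : List (String × List Int)) (out : Int) : Prop := out = calculate_strictAND_score_alt query_terms doc_positions
instance (query_terms : List String) (doc_positions : List (String × List Int)) (out : Int) : Decidable (Spec_calculate_strictAND_score query_terms doc_positions out) := by unfold Spec_calculate_strictAND_score; infer_instance

-- ===== CLAIM (what is proved, stated in full; the proofs are below) =====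
def Claim_equal_calculate_strictAND_score : Prop := ∀ (query_terms : List String) (doc_positions : List (String × List Int)), Dom_calculate_strictAND_score query_terms doc_positions → Spec_calculate_strictAND_score query_terms doc_positions (calculate_strictAND_score query_terms doc_positions)

-- ===== LEMMAS AND PROOFS =====

lemma pvCand_nil_right (xs : List Int) : pvCand xs [] = [] := by
  induction xs with
  | nil => rfl
  | cons a t ih => simp [pvCand] at ih ⊢

lemma pvCand_cons_cons (x y : Int) (xs ys : List Int) :
    pvCand (x :: xs) (y :: ys) =
      (|x - y| :: ys.map (fun r => |x - r|)) ++ pvCand xs (y :: ys) := by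
  simp [pvCand]

lemma pvCand_cons_right (x : Int) (xs ys : List Int) :
    pvCand (x :: xs) ys = ys.map (fun r => |x - r|) ++ pvCand xs ys := by
  simp [pvCand]

-- min of a nonempty list, written as a fold, is invariant under permutation
lemma pv_foldl_min_perm {x y : Int} {t u : List Int} (h : (x :: t).Perm (y :: u)) :
    t.foldl min x = u.foldl min y := by
  have h1 := PySem.List.min?_id_cons x t
  have h2 := PySem.List.min?_id_cons y u
  have m1m : t.foldl min x ∈ y :: u := h.mem_iff.mp (PySem.List.min?_mem h1)
  have m2m : u.foldl min y ∈ x :: t := h.symm.mem_iff.mp (PySem.List.min?_mem h2)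
  exact le_antisymm (PySem.List.min?_isMin h1 _ m2m) (PySem.List.min?_isMin h2 _ m1m)

lemma pv_foldl_min_absorb {l : List Int} {a : Int} (h : ∀ z ∈ l, a ≤ z) : l.foldl min a = a := by
  induction l with
  | nil => rfl
  | cons z l ih =>
    have : min a z = a := min_eq_left (h z (List.mem_cons_self))
    simp only [List.foldl_cons, this]
    exact ih (fun z' hz' => h z' (List.mem_cons_of_mem _ hz'))

-- dropping the cross pairs against a head y that is dominated by the accumulator
lemma pv_prune (y : Int) (ys : List Int) :
    ∀ (xs : List Int) (b : Int), (∀ x' ∈ xs, b ≤ |x' - y|) →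
      (pvCand xs (y :: ys)).foldl min b = (pvCand xs ys).foldl min b := by
  intro xs
  induction xs with
  | nil => intro b _; rfl
  | cons x0 xs ih =>
    intro b h
    rw [pvCand_cons_cons, pvCand_cons_right, List.foldl_append, List.foldl_append,
        List.foldl_cons, min_eq_left (h x0 (List.mem_cons_self))]
    exact ih _ (fun x' hx' =>
      le_trans (PySem.List.foldl_min_le (ys.map (fun r => |x0 - r|)) b).1
        (h x' (List.mem_cons_of_mem _ hx')))

-- the two-pointer sweep over two sorted lists computes the fold of min over all cross pairs
lemma pv_tp : ∀ (n : Nat) (xs ys : List Int) (b : Int), xs.length + ys.length ≤ n →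
    xs.Pairwise (· ≤ ·) → ys.Pairwise (· ≤ ·) →
    pvTwoPtr xs ys b = (pvCand xs ys).foldl min b := by
  intro n
  induction n with
  | zero =>
    intro xs ys b hn _ _
    have hx : xs = [] := by cases xs <;> simp_all
    have hy : ys = [] := by cases ys <;> simp_all
    subst hx; subst hy; simp [pvTwoPtr, pvCand]
  | succ n ih =>
    intro xs ys b hn hx hy
    match xs, ys with
    | [], ys => simp [pvTwoPtr, pvCand]
    | x :: xs, [] => simp [pvTwoPtr, pvCand_nil_right]
    | x :: xs, y :: ys =>
      have hbd : (if |x - y| < b then |x - y| else b) = min b |x - y| := by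
        split_ifs with h
        · exact (min_eq_right (le_of_lt h)).symm
        · exact (min_eq_left (not_lt.mp h)).symm
      simp only [pvTwoPtr, hbd]
      by_cases hxy : x < y
      · simp only [if_pos hxy]
        have habs : ∀ r ∈ ys, min b |x - y| ≤ |x - r| := by
          intro r hr
          have hyr : y ≤ r := List.rel_of_pairwise_cons hy hr
          have : |x - y| ≤ |x - r| := by
            rw [abs_of_nonpos (by omega), abs_of_nonpos (by omega)]; omega
          exact le_trans (min_le_right _ _) this
        rw [pvCand_cons_cons, List.foldl_append, List.foldl_cons,
            pv_foldl_min_absorb (l := ys.map (fun r => |x - r|)) (a := min b |x - y|)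
              (by intro z hz; obtain ⟨r, hr, rfl⟩ := List.mem_map.mp hz; exact habs r hr)]
        exact ih xs (y :: ys) (min b |x - y|) (by simp at hn ⊢; omega) hx.of_cons hy
      · simp only [if_neg hxy]
        have hyx : y ≤ x := not_lt.mp hxy
        rw [ih (x :: xs) ys (min b |x - y|) (by simp at hn ⊢; omega) hx hy.of_cons,
            pvCand_cons_right, List.foldl_append,
            pvCand_cons_cons, List.foldl_append, List.foldl_cons]
        exact (pv_prune y ys xs _ (by
          intro x' hx'
          have hxx' : x ≤ x' := List.rel_of_pairwise_cons hx hx'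
          have h1 : (ys.map (fun r => |x - r|)).foldl min (min b |x - y|) ≤ min b |x - y| :=
            (PySem.List.foldl_min_le _ _).1
          have h2 : |x - y| ≤ |x' - y| := by
            rw [abs_of_nonneg (by omega), abs_of_nonneg (by omega)]; omega
          exact le_trans h1 (le_trans (min_le_right _ _) h2))).symm

-- B's per-pair value equals A's per-pair value
lemma pv_pair (ls rs : List Int) (l0 r0 : Int) (lt' rt' : List Int)
    (hl : PySem.List.sorted ls (fun x => x) = l0 :: lt')
    (hr : PySem.List.sorted rs (fun x => x) = r0 :: rt') :
    pvTwoPtr (l0 :: lt') (r0 :: rt') |l0 - r0| = pvMinA (pvCand ls rs) := by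
  have hperm : (pvCand (l0 :: lt') (r0 :: rt')).Perm (pvCand ls rs) := by
    have h1 : (l0 :: lt').Perm ls := hl ▸ PySem.List.sorted_perm ls (fun x => x) false
    have h2 : (r0 :: rt').Perm rs := hr ▸ PySem.List.sorted_perm rs (fun x => x) false
    exact List.Perm.flatMap h1 (fun a _ => h2.map _)
  have hpx : (|l0 - r0| :: ((rt'.map (fun r => |l0 - r|)) ++ pvCand lt' (r0 :: rt'))).Perm (pvCand ls rs) := by
    rw [← List.cons_append, ← pvCand_cons_cons]; exact hperm
  obtain ⟨c, cs, hcc⟩ : ∃ c cs, pvCand ls rs = c :: cs := by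
    cases hc : pvCand ls rs with
    | nil => rw [hc] at hpx; simp at hpx
    | cons c cs => exact ⟨c, cs, rfl⟩
  have hsx : (l0 :: lt').Pairwise (· ≤ ·) := by
    have := PySem.List.sorted_pairwise ls (fun x => x); rw [hl] at this; exact this
  have hsy : (r0 :: rt').Pairwise (· ≤ ·) := by
    have := PySem.List.sorted_pairwise rs (fun x => x); rw [hr] at this; exact this
  rw [pv_tp ((l0 :: lt').length + (r0 :: rt').length) _ _ _ le_rfl hsx hsy,
      pvCand_cons_cons, hcc, pvMinA, List.cons_append, List.foldl_cons, min_self]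
  exact pv_foldl_min_perm (by rw [hcc] at hpx; exact hpx)

-- the two loops agree, stepping A's index loop against B's pair loop
lemma pv_loops (dp : List (String × List Int)) :
    ∀ (m : Nat) (qs : List String) (k : Nat) (total : Int), m = qs.length - 1 - k →
      pvALoop qs dp ((List.range m).map (fun j => ((k + j : Nat) : Int))) total
        = pvBLoop dp ((qs.drop k).zip (qs.drop (k + 1))) total := by
  intro m
  induction m with
  | zero =>
    intro qs k total hm
    have hdrop : qs.drop (k + 1) = [] := List.drop_eq_nil_iff.mpr (by omega)
    rw [hdrop, List.zip_nil_right]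
    simp [pvALoop, pvBLoop]
  | succ m ih =>
    intro qs k total hm
    have hk1 : k + 1 < qs.length := by omega
    have hk : k < qs.length := by omega
    have hrange : (List.range (m + 1)).map (fun j => ((k + j : Nat) : Int))
        = ((k : Nat) : Int) :: (List.range m).map (fun j => (((k + 1) + j : Nat) : Int)) := by
      rw [List.range_succ_eq_map, List.map_cons, List.map_map]
      refine congrArg₂ _ (by norm_num) (List.map_congr_left ?_)
      intro j _
      simp only [Function.comp_apply]
      push_cast
      ring
    have hzip : (qs.drop k).zip (qs.drop (k + 1))
        = (qs[k], qs[k + 1]) :: ((qs.drop (k + 1)).zip (qs.drop (k + 1 + 1))) := by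
      rw [List.drop_eq_getElem_cons hk, List.drop_eq_getElem_cons hk1, List.zip_cons_cons]
    rw [hrange, hzip]
    simp only [pvALoop, pvBLoop]
    have hg1 : PySem.List.pyGetD qs ((k : Nat) : Int) "" = qs[k] := by
      rw [PySem.List.pyGetD_natCast]; exact List.getD_eq_getElem qs "" hk
    have hg2 : PySem.List.pyGetD qs (((k : Nat) : Int) + 1) "" = qs[k + 1] := by
      rw [show ((k : Nat) : Int) + 1 = ((k + 1 : Nat) : Int) by push_cast; ring,
          PySem.List.pyGetD_natCast]
      exact List.getD_eq_getElem qs "" hk1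
    rw [hg1, hg2]
    by_cases hL : PySem.Dict.getD (PySem.Dict.mk dp) qs[k] [] = []
    · rw [if_pos (Or.inl hL)]
      rw [(PySem.List.sorted_eq_nil_iff _ _ _).mpr hL]
    · by_cases hR : PySem.Dict.getD (PySem.Dict.mk dp) qs[k + 1] [] = []
      · rw [if_pos (Or.inr hR)]
        rw [(PySem.List.sorted_eq_nil_iff _ _ _).mpr hR]
        cases h : PySem.List.sorted (PySem.Dict.getD (PySem.Dict.mk dp) qs[k] []) (fun x => x) <;> rfl
      · rw [if_neg (by simp [hL, hR])]
        have hlne : PySem.List.sorted (PySem.Dict.getD (PySem.Dict.mk dp) qs[k] []) (fun x : Int => x) ≠ [] := by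
          simp [PySem.List.sorted_eq_nil_iff, hL]
        have hrne : PySem.List.sorted (PySem.Dict.getD (PySem.Dict.mk dp) qs[k + 1] []) (fun x : Int => x) ≠ [] := by
          simp [PySem.List.sorted_eq_nil_iff, hR]
        obtain ⟨l0, lt', hl⟩ := List.exists_cons_of_ne_nil hlne
        obtain ⟨r0, rt', hr⟩ := List.exists_cons_of_ne_nil hrne
        rw [hl, hr]
        have hpair := pv_pair _ _ l0 r0 lt' rt' hl hr
        simp only [hpair]
        exact ih qs (k + 1) _ (by omega)

-- ===== VERDICT (by name: the statement is the Claim_ definition above) =====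
theorem calculate_strictAND_score_spec : Claim_equal_calculate_strictAND_score := by
  intro qs dp _
  unfold Spec_calculate_strictAND_score calculate_strictAND_score calculate_strictAND_score_alt
  cases qs with
  | nil => simp [pvALoop, pvBLoop, PySem.List.pyRange, PySem.List.slice]
  | cons q t =>
    have hlen : (((q :: t).length : Nat) : Int) - 1 = ((t.length : Nat) : Int) := by
      push_cast [List.length_cons]; ring
    rw [hlen, PySem.List.pyRange_zero_natCast]
    have hslice : PySem.List.slice (q :: t) (some 1) none = (q :: t).drop 1 := by simp [pysem]
    rw [hslice]
    have h := pv_loops dp t.length (q :: t) 0 0 (by simp)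
    simpa using h
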